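-- pv_equiv track=rewrite | github.com/reiganarmstrong/CMSC-441 | Reagan Armstrong - bb_tmpl.py | bb_itr
-- ===== SOURCE A (Python) =====
-- def bb_itr(data):
--     c = [0]  # list containing max revenue for each subproblem
--     next_opt = []
--     ##
--     # Code goes here
--     ##
--     for i in range(len(data)):
--         left = (c[i])
--         valid_indexes = ([x+1 for x in range(i) if (
--             abs(data[x][0]-data[i][0]) > 5)])
--         sub_rev = 0
--         sub_index = 0
--         for x in valid_indexes:
--             if c[x] > sub_rev:
--                 sub_rev = c[x]
--                 sub_index = x
--         right = sub_rev+data[i][1]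
--         if left > right:
--             c.append(left)
--             next_opt.append((0, i))
--         else:
--             c.append(right)
--             next_opt.append((1, sub_index))
--     return max(c), next_opt
-- ===== SOURCE B (Python) =====
-- def _gt(a, b):
--     # strict lexicographic comparison on (value, -index) entries
--     return a[0] > b[0] or (a[0] == b[0] and a[1] > b[1])
--
--
-- def bb_itr(data):
--     # O(n): the excluded window [d-5, d+5] covers at most 11 integer coordinates,
--     # so the best valid predecessor is always among the 12 lexicographically
--     # largest per-coordinate entries (distinct coordinates), kept in `top`.
--     best = {}   # coordinate -> lexicographically largest (c-value, -index) entry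
--     top = []    # up to 12 entries (value, -index, coordinate), sorted descending
--     c = [0]
--     next_opt = []
--     for i, (d, p) in enumerate(data):
--         sub_rev = 0
--         sub_index = 0
--         for v, nx, coord in top:
--             if coord < d - 5 or coord > d + 5:
--                 if v > 0:
--                     sub_rev = v
--                     sub_index = -nx
--                 break
--         left = c[-1]
--         right = sub_rev + p
--         if left > right:
--             c.append(left)
--             next_opt.append((0, i))
--         else:
--             c.append(right)
--             next_opt.append((1, sub_index))
--         entry = (c[-1], -(i + 1))
--         if d in best and _gt(best[d], entry):
--             entry = best[d]
--         best[d] = entry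
--         top = [e for e in top if e[2] != d]
--         j = 0
--         while j < len(top) and _gt((top[j][0], top[j][1]), entry):
--             j += 1
--         top.insert(j, (entry[0], entry[1], d))
--         del top[12:]
--     return c[-1], next_opt
-- ===== Notes on version B (the rewrite author's own statement) =====
-- stated objective: faster
-- what changed: A rescans all earlier subproblems for each pickup (rebuilding the valid-index list and taking a running max); B keeps a per-coordinate best-(revenue,-index) dictionary plus a sorted 12-entry shortlist of the best entries over distinct coordinates - since the excluded window [d-5,d+5] contains at most 11 integer coordinates, one shortlist entry is always valid - so each step is O(1), and it returns c[-1] instead of max(c) since c is nondecreasing.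
import Mathlib
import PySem

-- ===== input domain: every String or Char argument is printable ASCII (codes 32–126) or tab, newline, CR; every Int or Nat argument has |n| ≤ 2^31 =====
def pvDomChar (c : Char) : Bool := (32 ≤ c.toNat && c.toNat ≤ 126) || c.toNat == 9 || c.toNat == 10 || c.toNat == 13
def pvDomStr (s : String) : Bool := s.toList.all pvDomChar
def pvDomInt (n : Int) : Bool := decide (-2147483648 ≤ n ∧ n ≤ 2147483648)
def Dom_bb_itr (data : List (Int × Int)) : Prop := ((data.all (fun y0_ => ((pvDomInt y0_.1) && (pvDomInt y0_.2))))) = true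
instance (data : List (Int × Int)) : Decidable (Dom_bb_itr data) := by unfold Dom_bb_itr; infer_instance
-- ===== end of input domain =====

-- B replaces A's quadratic inner scan by an O(1) query into a 12-entry list of the best
-- per-coordinate candidates (the excluded window [d-5,d+5] holds at most 11 integer
-- coordinates), making B linear time; objective: faster (asymptotic).

-- ===== PORT A =====
def stepA (data : List (Int × Int)) (st : List Int × List (Int × Int)) (i : Nat) :
    List Int × List (Int × Int) :=
  let c := st.1
  let left := c.getD i 0
  let valid := ((List.range i).filter
      (fun x => decide (5 < |(data.getD x (0, 0)).1 - (data.getD i (0, 0)).1|))).map (fun x => x + 1)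
  let s := valid.foldl
      (fun (s : Int × Int) x => if c.getD x 0 > s.1 then (c.getD x 0, (x : Int)) else s) (0, 0)
  let right := s.1 + (data.getD i (0, 0)).2
  if left > right then (c ++ [left], st.2 ++ [((0 : Int), (i : Int))])
  else (c ++ [right], st.2 ++ [((1 : Int), s.2)])

def bb_itr (data : List (Int × Int)) : Int × (List (Int × Int)) :=
  let st := (List.range data.length).foldl (stepA data) ([0], [])
  ((PySem.List.max? st.1 (fun v => v)).getD 0, st.2)

-- ===== PORT B =====
-- strict lexicographic comparison on (value, -index) entries (Source B's _gt)
def gtB (a b : Int × Int) : Bool := a.1 > b.1 || (a.1 == b.1 && a.2 > b.2)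

-- the 'for v, nx, coord in top: … break' loop of Source B
def scanTop (d : Int) : List (Int × Int × Int) → Int × Int
  | [] => (0, 0)
  | e :: rest =>
    if e.2.2 < d - 5 || e.2.2 > d + 5 then
      (if e.1 > 0 then (e.1, -e.2.1) else (0, 0))
    else scanTop d rest

-- the 'while j < len(top) and _gt(…): j += 1; top.insert(j, …)' of Source B
def insTop (v nx dc : Int) : List (Int × Int × Int) → List (Int × Int × Int)
  | [] => [(v, nx, dc)]
  | t :: rest =>
    if gtB (t.1, t.2.1) (v, nx) then t :: insTop v nx dc rest else (v, nx, dc) :: t :: rest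

def stepB (st : PySem.Dict Int (Int × Int) × List (Int × Int × Int) × List Int × List (Int × Int))
    (ip : Int × Int × Int) :
    PySem.Dict Int (Int × Int) × List (Int × Int × Int) × List Int × List (Int × Int) :=
  let best := st.1
  let top := st.2.1
  let c := st.2.2.1
  let no := st.2.2.2
  let i := ip.1
  let d := ip.2.1
  let p := ip.2.2
  let s := scanTop d top
  let left := c.getLastD 0
  let right := s.1 + p
  let c' := if left > right then c ++ [left] else c ++ [right]
  let no' := if left > right then no ++ [((0 : Int), i)] else no ++ [((1 : Int), s.2)]
  let e0 : Int × Int := (c'.getLastD 0, -(i + 1))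
  let entry := match best.get? d with
    | some b => if gtB b e0 then b else e0
    | none => e0
  let best' := best.insert d entry
  let top' := (insTop entry.1 entry.2 d (top.filter (fun e => e.2.2 != d))).take 12
  (best', top', c', no')

def bb_itr_alt (data : List (Int × Int)) : Int × (List (Int × Int)) :=
  let st := (PySem.List.enumerate data).foldl stepB (PySem.Dict.empty, [], [0], [])
  (st.2.2.1.getLastD 0, st.2.2.2)

-- ===== PRECONDITION & SPEC =====
def Spec_bb_itr (data : List (Int × Int)) (out : Int × (List (Int × Int))) : Prop := out = bb_itr_alt data
instance (data : List (Int × Int)) (out : Int × (List (Int × Int))) : Decidable (Spec_bb_itr data out) := by unfold Spec_bb_itr; infer_instance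

-- ===== CLAIM (what is proved, stated in full; the proofs are below) =====
def Claim_equal_bb_itr : Prop := ∀ (data : List (Int × Int)), Dom_bb_itr data → Spec_bb_itr data (bb_itr data)

-- ===== LEMMAS AND PROOFS =====

-- lexicographic order on (value, -index) pairs: the order both programs maximise by
def lle (a b : Int × Int) : Prop := a.1 < b.1 ∨ (a.1 = b.1 ∧ a.2 ≤ b.2)

lemma lle_refl (a : Int × Int) : lle a a := by simp [lle]

lemma lle_trans {a b c : Int × Int} (h1 : lle a b) (h2 : lle b c) : lle a c := by
  rcases a with ⟨a1, a2⟩; rcases b with ⟨b1, b2⟩; rcases c with ⟨c1, c2⟩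
  simp only [lle] at *; omega

lemma lle_antisymm {a b : Int × Int} (h1 : lle a b) (h2 : lle b a) : a = b := by
  rcases a with ⟨a1, a2⟩; rcases b with ⟨b1, b2⟩
  simp only [lle, Prod.mk.injEq] at *; omega

lemma window_iff (a d : Int) : 5 < |a - d| ↔ a < d - 5 ∨ d + 5 < a := by
  rcases abs_cases (a - d) with ⟨h1, h2⟩ | ⟨h1, h2⟩ <;> omega

lemma gtB_true {a b : Int × Int} (h : gtB a b = true) : lle b a := by
  rcases a with ⟨a1, a2⟩; rcases b with ⟨b1, b2⟩
  simp only [gtB, lle, Bool.or_eq_true, Bool.and_eq_true, decide_eq_true_eq, beq_iff_eq] at *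
  omega

lemma gtB_false {a b : Int × Int} (h : gtB a b = false) : lle a b := by
  rcases a with ⟨a1, a2⟩; rcases b with ⟨b1, b2⟩
  simp only [gtB, lle, Bool.or_eq_false_iff, Bool.and_eq_false_iff, decide_eq_false_iff_not,
    beq_eq_false_iff_ne, ne_eq] at *
  omega

-- state of A's fold after i iterations
def SA (data : List (Int × Int)) (i : Nat) : List Int × List (Int × Int) :=
  (List.range i).foldl (stepA data) ([0], [])

-- state of B's fold after i iterations
def SB (data : List (Int × Int)) (i : Nat) :
    PySem.Dict Int (Int × Int) × List (Int × Int × Int) × List Int × List (Int × Int) :=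
  ((PySem.List.enumerate data).take i).foldl stepB (PySem.Dict.empty, [], [0], [])

def coordOf (data : List (Int × Int)) (j : Nat) : Int := (data.getD j (0, 0)).1

-- the (value, -index) pair subproblem x contributes
def pr (c : List Int) (x : Nat) : Int × Int := (c.getD x 0, -(x : Int))

-- subproblem x is a legal predecessor at step i with pickup coordinate d
def ValidAt (data : List (Int × Int)) (i x : Nat) (d : Int) : Prop :=
  1 ≤ x ∧ x ≤ i ∧ 5 < |coordOf data (x - 1) - d|

-- r is the lexicographic maximum of (0,0) and all valid predecessor pairs
def IsBest (data : List (Int × Int)) (c : List Int) (i : Nat) (d : Int) (r : Int × Int) : Prop :=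
  (r = (0, 0) ∨ ∃ x, ValidAt data i x d ∧ r = pr c x) ∧ lle (0, 0) r ∧
    ∀ x, ValidAt data i x d → lle (pr c x) r

lemma IsMax_unique {data c i d r1 r2} (h1 : IsBest data c i d r1) (h2 : IsBest data c i d r2) :
    r1 = r2 := by
  obtain ⟨m1, z1, u1⟩ := h1
  obtain ⟨m2, z2, u2⟩ := h2
  apply lle_antisymm
  · rcases m1 with h | ⟨x, hv, rfl⟩
    · exact h ▸ z2
    · exact u2 x hv
  · rcases m2 with h | ⟨x, hv, rfl⟩
    · exact h ▸ z1
    · exact u1 x hv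

-- joint invariant of the two loops
structure LoopInv (data : List (Int × Int)) (i : Nat) : Prop where
  ceq : (SB data i).2.2.1 = (SA data i).1
  neq : (SB data i).2.2.2 = (SA data i).2
  clen : (SA data i).1.length = i + 1
  cmono : (SA data i).1.IsChain (· ≤ ·)
  dnone : ∀ k : Int, (SB data i).1.get? k = none →
      ∀ x : Nat, 1 ≤ x → x ≤ i → coordOf data (x - 1) ≠ k
  dsome : ∀ k e, (SB data i).1.get? k = some e →
      (∃ x, 1 ≤ x ∧ x ≤ i ∧ coordOf data (x - 1) = k ∧ e = pr (SA data i).1 x) ∧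
      ∀ x, 1 ≤ x → x ≤ i → coordOf data (x - 1) = k → lle (pr (SA data i).1 x) e
  ta : ∀ e ∈ (SB data i).2.1, (SB data i).1.get? e.2.2 = some (e.1, e.2.1)
  tnodup : ((SB data i).2.1.map (·.2.2)).Nodup
  tsorted : (SB data i).2.1.Pairwise (fun a b => lle (b.1, b.2.1) (a.1, a.2.1))
  tlen : (SB data i).2.1.length ≤ 12
  tcomplete : ∀ k e, (SB data i).1.get? k = some e →
      (e.1, e.2, k) ∈ (SB data i).2.1 ∨
      ((SB data i).2.1.length = 12 ∧ ∀ t ∈ (SB data i).2.1, lle e (t.1, t.2.1))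

lemma loopInv_zero (data : List (Int × Int)) : LoopInv data 0 := by
  constructor <;> simp [SA, SB, PySem.Dict.get?_empty] <;> omega

lemma SA_succ (data : List (Int × Int)) (i : Nat) :
    SA data (i + 1) = stepA data (SA data i) i := by
  simp [SA, List.range_succ]

lemma SB_succ (data : List (Int × Int)) (i : Nat) (h : i < data.length) :
    SB data (i + 1) = stepB (SB data i) ((i : Int), data.getD i (0, 0)) := by
  unfold SB
  rw [List.take_succ]
  have he : (PySem.List.enumerate data)[i]? = some ((i : Int), data.getD i (0, 0)) := by
    rw [PySem.List.getElem?_enumerate]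
    rw [List.getElem?_eq_getElem h]
    simp [List.getD_eq_getElem?_getD, List.getElem?_eq_getElem h]
  rw [he]
  simp [List.foldl_append]

-- A's inner scan, as a named step function (definitionally the lambda in stepA)
def astep (c : List Int) (s : Int × Int) (x : Nat) : Int × Int :=
  if c.getD x 0 > s.1 then (c.getD x 0, (x : Int)) else s

-- the valid-predecessor list A builds at step i
def valList (data : List (Int × Int)) (i : Nat) : List Nat :=
  ((List.range i).filter
      (fun x => decide (5 < |(data.getD x (0, 0)).1 - (data.getD i (0, 0)).1|))).map (fun x => x + 1)

lemma mem_valList {data : List (Int × Int)} {i x : Nat} :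
    x ∈ valList data i ↔ ValidAt data i x (data.getD i (0, 0)).1 := by
  simp only [valList, List.mem_map, List.mem_filter, List.mem_range, decide_eq_true_eq]
  constructor
  · rintro ⟨x0, ⟨hx0, habs⟩, rfl⟩
    refine ⟨by omega, by omega, ?_⟩
    simpa [coordOf] using habs
  · rintro ⟨h1, h2, habs⟩
    refine ⟨x - 1, ⟨by omega, ?_⟩, by omega⟩
    simpa [coordOf] using habs

lemma pairwise_valList (data : List (Int × Int)) (i : Nat) :
    (valList data i).Pairwise (· < ·) := by
  unfold valList
  exact ((List.pairwise_lt_range).filter _).map _ (fun h => by omega)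

-- A's inner scan computes the lexicographic maximum (generalised over the start state)
lemma scanA_go (c : List Int) : ∀ (L : List Nat) (s : Int × Int), L.Pairwise (· < ·) →
    (∀ x ∈ L, s.2 < (x : Int)) →
    (L.foldl (astep c) s = s ∨ ∃ x ∈ L, L.foldl (astep c) s = (c.getD x 0, (x : Int))) ∧
    (∀ x ∈ L, lle (pr c x) ((L.foldl (astep c) s).1, -(L.foldl (astep c) s).2)) ∧
    lle (s.1, -s.2) ((L.foldl (astep c) s).1, -(L.foldl (astep c) s).2) := by
  intro L
  induction L with
  | nil =>
    intro s _ _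
    exact ⟨Or.inl rfl, by simp, lle_refl _⟩
  | cons x rest ih =>
    intro s hp hb
    rw [List.pairwise_cons] at hp
    obtain ⟨hx, hrest⟩ := hp
    have hsx : s.2 < (x : Int) := hb x (by simp)
    have hb' : ∀ y ∈ rest, (astep c s x).2 < (y : Int) := by
      intro y hy
      have hxy : x < y := hx y hy
      unfold astep
      split
      · simpa using (by exact_mod_cast hxy : (x : Int) < (y : Int))
      · exact lt_trans hsx (by exact_mod_cast hxy)
    obtain ⟨hmem, hub, hmono⟩ := ih (astep c s x) hrest hb'
    simp only [List.foldl_cons]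
    refine ⟨?_, ?_, ?_⟩
    · rcases hmem with h | ⟨y, hy, h⟩
      · rw [h]
        unfold astep
        split
        · exact Or.inr ⟨x, by simp⟩
        · exact Or.inl rfl
      · exact Or.inr ⟨y, by simp [hy], h⟩
    · intro y hy
      rcases List.mem_cons.mp hy with rfl | hy'
      · refine lle_trans ?_ hmono
        unfold astep pr lle
        split
        · rename_i hgt
          simp
        · rename_i hgt
          push_neg at hgt
          simp only []
          rcases lt_or_eq_of_le hgt with hlt | heq
          · exact Or.inl hlt
          · exact Or.inr ⟨heq, by omega⟩
      · exact hub y hy'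
    · refine lle_trans ?_ hmono
      unfold astep lle
      split
      · rename_i hgt
        exact Or.inl hgt
      · simp

-- specialisation to the list A builds at step i
lemma scanA_spec (data : List (Int × Int)) (c : List Int) (i : Nat) :
    IsBest data c i (data.getD i (0, 0)).1
      (((valList data i).foldl (astep c) (0, 0)).1,
       -((valList data i).foldl (astep c) (0, 0)).2) := by
  have hbound : ∀ x ∈ valList data i, ((0, 0) : Int × Int).2 < (x : Int) := by
    intro x hx
    have := (mem_valList.mp hx).1
    simp; omega
  obtain ⟨hmem, hub, hmono⟩ := scanA_go c (valList data i) (0, 0) (pairwise_valList data i) hbound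
  refine ⟨?_, by simpa using hmono, fun x hv => hub x (mem_valList.mpr hv)⟩
  rcases hmem with h | ⟨x, hx, h⟩
  · left; rw [h]; norm_num
  · right
    exact ⟨x, mem_valList.mp hx, by rw [h]; rfl⟩

-- scanTop is the first-match scan
lemma scanTop_eq_find? (d : Int) (T : List (Int × Int × Int)) :
    scanTop d T = match T.find? (fun e => e.2.2 < d - 5 || e.2.2 > d + 5) with
      | none => (0, 0)
      | some e => if e.1 > 0 then (e.1, -e.2.1) else (0, 0) := by
  induction T with
  | nil => simp [scanTop]
  | cons e rest ih =>
    by_cases h : (e.2.2 < d - 5 || e.2.2 > d + 5) = true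
    · simp [scanTop, h, List.find?]
    · simp only [Bool.not_eq_true] at h
      simp [scanTop, h, List.find?, ih]

lemma scanTop_of_none {d : Int} {T : List (Int × Int × Int)}
    (h : T.find? (fun e => decide (e.2.2 < d - 5) || decide (e.2.2 > d + 5)) = none) :
    scanTop d T = (0, 0) := by
  rw [scanTop_eq_find?, h]

lemma scanTop_of_some {d : Int} {T : List (Int × Int × Int)} {e : Int × Int × Int}
    (h : T.find? (fun e => decide (e.2.2 < d - 5) || decide (e.2.2 > d + 5)) = some e) :
    scanTop d T = if e.1 > 0 then (e.1, -e.2.1) else (0, 0) := by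
  rw [scanTop_eq_find?, h]

-- at most 11 distinct integer coordinates fit in the excluded window
lemma pigeon (T : List (Int × Int × Int)) (d : Int) (hn : (T.map (·.2.2)).Nodup)
    (hin : ∀ e ∈ T, d - 5 ≤ e.2.2 ∧ e.2.2 ≤ d + 5) : T.length ≤ 11 := by
  have hsub : (T.map (·.2.2)).toFinset ⊆ Finset.Icc (d - 5) (d + 5) := by
    intro k hk
    simp only [List.mem_toFinset, List.mem_map] at hk
    obtain ⟨e, he, rfl⟩ := hk
    simpa [Finset.mem_Icc] using hin e he
  have hcard := Finset.card_le_card hsub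
  rw [List.toFinset_card_of_nodup hn, Int.card_Icc] at hcard
  have h11 : d + 5 + 1 - (d - 5) = (11 : Int) := by ring
  rw [h11] at hcard
  simpa using hcard

-- B's query computes the same lexicographic maximum
lemma scanB_spec (data : List (Int × Int)) (i : Nat) (inv : LoopInv data i) :
    IsBest data (SA data i).1 i (data.getD i (0, 0)).1
      ((scanTop (data.getD i (0, 0)).1 (SB data i).2.1).1,
       -(scanTop (data.getD i (0, 0)).1 (SB data i).2.1).2) := by
  set d := (data.getD i (0, 0)).1 with hd
  set T := (SB data i).2.1 with hT
  set c := (SA data i).1 with hc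
  cases hf : T.find? (fun e => decide (e.2.2 < d - 5) || decide (e.2.2 > d + 5)) with
  | none =>
    rw [scanTop_of_none hf]
    rw [List.find?_eq_none] at hf
    have hnov : ∀ x, ¬ ValidAt data i x d := by
      intro x hv
      obtain ⟨h1, h2, habs⟩ := hv
      rw [window_iff] at habs
      cases hbk : (SB data i).1.get? (coordOf data (x - 1)) with
      | none => exact inv.dnone _ hbk x h1 h2 rfl
      | some b =>
        have hout : (decide (coordOf data (x - 1) < d - 5) ||
            decide (coordOf data (x - 1) > d + 5)) = true := by
          simp only [Bool.or_eq_true, decide_eq_true_eq]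
          omega
        rcases inv.tcomplete _ b hbk with hin | ⟨hfull, _⟩
        · rw [← hT] at hin
          exact absurd hout (by simpa using hf _ hin)
        · have hin11 : ∀ e ∈ T, d - 5 ≤ e.2.2 ∧ e.2.2 ≤ d + 5 := by
            intro e he
            have := hf e he
            simp only [Bool.or_eq_true, decide_eq_true_eq, not_or, decide_eq_false_iff_not] at this
            omega
          rw [← hT] at hfull
          have := pigeon T d (by rw [hT]; exact inv.tnodup) hin11
          omega
    exact ⟨Or.inl rfl, by simpa using lle_refl ((0, 0) : Int × Int),
      fun x hv => absurd hv (hnov x)⟩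
  | some e =>
    rw [scanTop_of_some hf]
    obtain ⟨hpe, as, bs, hsplit, has⟩ := List.find?_eq_some_iff_append.mp hf
    have heT : e ∈ T := by rw [hsplit]; simp
    have hbe := inv.ta e heT
    obtain ⟨⟨x0, hx01, hx0i, hx0c, hx0e⟩, _⟩ := inv.dsome e.2.2 (e.1, e.2.1) hbe
    have hout : e.2.2 < d - 5 ∨ e.2.2 > d + 5 := by
      simpa [Bool.or_eq_true, decide_eq_true_eq] using hpe
    have hvx0 : ValidAt data i x0 d := ⟨hx01, hx0i, by rw [hx0c, window_iff]; omega⟩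
    have hfst : e.1 = c.getD x0 0 := by
      have := congrArg Prod.fst hx0e
      simpa [pr] using this
    have hsnd : e.2.1 = -(x0 : Int) := by
      have := congrArg Prod.snd hx0e
      simpa [pr] using this
    have hub : ∀ x, ValidAt data i x d → lle (pr c x) (e.1, e.2.1) := by
      intro x hv
      obtain ⟨h1, h2, habs⟩ := hv
      rw [window_iff] at habs
      cases hbk : (SB data i).1.get? (coordOf data (x - 1)) with
      | none => exact absurd rfl (inv.dnone _ hbk x h1 h2)
      | some b =>
        obtain ⟨_, hubk'⟩ := inv.dsome _ b hbk
        refine lle_trans (hubk' x h1 h2 rfl) ?_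
        rcases inv.tcomplete _ b hbk with hin | ⟨_, hballT⟩
        · have hkout : (decide (((b.1, b.2, coordOf data (x - 1)) : Int × Int × Int).2.2 < d - 5) ||
              decide (((b.1, b.2, coordOf data (x - 1)) : Int × Int × Int).2.2 > d + 5)) = true := by
            simp only [Bool.or_eq_true, decide_eq_true_eq]
            omega
          rw [← hT, hsplit] at hin
          rcases List.mem_append.mp hin with hin' | hin'
          · exact absurd hkout (by simpa using has _ hin')
          · rcases List.mem_cons.mp hin' with heq | hin''
            · have h1' : b.1 = e.1 := by
                have := congrArg (fun t : Int × Int × Int => t.1) heq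
                simpa using this
              have h2' : b.2 = e.2.1 := by
                have := congrArg (fun t : Int × Int × Int => t.2.1) heq
                simpa using this
              rw [show b = (e.1, e.2.1) from Prod.ext h1' h2']
              exact lle_refl _
            · have hsrt := inv.tsorted
              rw [← hT, hsplit] at hsrt
              have := (List.pairwise_cons.mp (List.pairwise_append.mp hsrt).2.1).1 _ hin''
              simpa using this
        · exact hballT e heT
    by_cases hpos : e.1 > 0
    · rw [if_pos (by simpa using hpos)]
      refine ⟨Or.inr ⟨x0, hvx0, ?_⟩, Or.inl (by simpa using hpos), ?_⟩
      · simp only [neg_neg, pr, ← hfst, ← hsnd]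
      · intro x hv
        simpa [neg_neg] using hub x hv
    · rw [if_neg (by simpa using hpos)]
      push_neg at hpos
      refine ⟨Or.inl rfl, by simpa using lle_refl ((0, 0) : Int × Int), ?_⟩
      intro x hv
      refine lle_trans (hub x hv) ?_
      show lle (e.1, e.2.1) ((0 : Int), -(0 : Int))
      rcases lt_or_eq_of_le hpos with h | h
      · exact Or.inl h
      · exact Or.inr ⟨h, by rw [hsnd]; omega⟩

-- insTop inserts its entry somewhere in the list
lemma insTop_perm (v nx dc : Int) (T : List (Int × Int × Int)) :
    (insTop v nx dc T).Perm ((v, nx, dc) :: T) := by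
  induction T with
  | nil => simp [insTop]
  | cons t rest ih =>
    by_cases h : gtB (t.1, t.2.1) (v, nx) = true
    · simpa [insTop, h] using (ih.cons t).trans (List.Perm.swap _ _ _)
    · simp only [Bool.not_eq_true] at h
      simp [insTop, h]

lemma mem_insTop {y : Int × Int × Int} {v nx dc : Int} {T : List (Int × Int × Int)} :
    y ∈ insTop v nx dc T ↔ y = (v, nx, dc) ∨ y ∈ T := by
  rw [(insTop_perm v nx dc T).mem_iff]; simp

lemma insTop_sorted {v nx dc : Int} {T : List (Int × Int × Int)}
    (hT : T.Pairwise (fun a b => lle (b.1, b.2.1) (a.1, a.2.1))) :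
    (insTop v nx dc T).Pairwise (fun a b => lle (b.1, b.2.1) (a.1, a.2.1)) := by
  induction T with
  | nil => simp [insTop]
  | cons t rest ih =>
    rw [List.pairwise_cons] at hT
    obtain ⟨ht, hrest⟩ := hT
    by_cases hg : gtB (t.1, t.2.1) (v, nx) = true
    · rw [insTop, if_pos hg, List.pairwise_cons]
      refine ⟨?_, ih hrest⟩
      intro b hb
      rcases mem_insTop.mp hb with rfl | hb'
      · exact gtB_true hg
      · exact ht b hb'
    · rw [insTop, if_neg hg, List.pairwise_cons]
      refine ⟨?_, List.pairwise_cons.mpr ⟨ht, hrest⟩⟩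
      intro b hb
      rcases List.mem_cons.mp hb with rfl | hb'
      · exact gtB_false (Bool.not_eq_true _ ▸ hg)
      · exact lle_trans (ht b hb') (gtB_false (Bool.not_eq_true _ ▸ hg))

lemma insTop_length (v nx dc : Int) (T : List (Int × Int × Int)) :
    (insTop v nx dc T).length = T.length + 1 := by
  simpa using (insTop_perm v nx dc T).length_eq

-- every element of a sorted list is either kept by take 12 or bounded by all kept elements
lemma take_cases {I : List (Int × Int × Int)}
    (hs : I.Pairwise (fun a b => lle (b.1, b.2.1) (a.1, a.2.1))) :
    ∀ y ∈ I, y ∈ I.take 12 ∨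
      ((I.take 12).length = 12 ∧ ∀ t ∈ I.take 12, lle (y.1, y.2.1) (t.1, t.2.1)) := by
  intro y hy
  have hsplit : I.take 12 ++ I.drop 12 = I := List.take_append_drop 12 I
  have hp : (I.take 12 ++ I.drop 12).Pairwise (fun a b => lle (b.1, b.2.1) (a.1, a.2.1)) := by
    rwa [hsplit]
  have hcross := (List.pairwise_append.mp hp).2.2
  rw [← hsplit] at hy
  rcases List.mem_append.mp hy with h | h
  · exact Or.inl h
  · right
    constructor
    · have hlen : 12 < I.length := by
        by_contra hle
        rw [List.drop_eq_nil_iff.mpr (by omega)] at h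
        exact absurd h (List.not_mem_nil)
      simp [List.length_take]; omega
    · intro t ht
      exact hcross t ht y h

lemma getD_last (l : List Int) (n : Nat) (h : l.length = n + 1) :
    l.getD n 0 = l.getLastD 0 := by
  rw [List.getLastD_eq_getLast?, List.getLast?_eq_getElem?, List.getD_eq_getElem?_getD, h]
  simp

lemma getD_concat (l : List Int) (v : Int) (n : Nat) (h : l.length = n + 1) :
    (l ++ [v]).getD (n + 1) 0 = v := by
  rw [List.getD_eq_getElem?_getD, List.getElem?_append_right (by omega), h]
  simp

-- at most one entry of a coordinate-nodup list is removed by filtering one coordinate away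
lemma length_filter_coord_ne (T : List (Int × Int × Int)) (d : Int)
    (hn : (T.map (·.2.2)).Nodup) : T.length ≤ (T.filter (fun e => e.2.2 != d)).length + 1 := by
  induction T with
  | nil => simp
  | cons t rest ih =>
    simp only [List.map_cons, List.nodup_cons] at hn
    obtain ⟨hnotin, hrest⟩ := hn
    by_cases htd : t.2.2 = d
    · have hall : rest.filter (fun e => e.2.2 != d) = rest := by
        apply List.filter_eq_self.mpr
        intro e he
        refine bne_iff_ne.mpr (fun hED => hnotin ?_)
        rw [htd, ← hED]
        exact List.mem_map.mpr ⟨e, he, rfl⟩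
      rw [List.filter_cons_of_neg (by simp [htd]), hall]
      simp
    · rw [List.filter_cons_of_pos (by simp [htd])]
      have := ih hrest
      simp only [List.length_cons]
      omega

-- the one-step preservation lemma
lemma inv_step (data : List (Int × Int)) (i : Nat) (h : i < data.length) (inv : LoopInv data i) :
    LoopInv data (i + 1) := by
  classical
  set cA := (SA data i).1 with hcA
  set noA := (SA data i).2 with hnoA
  set best := (SB data i).1 with hbest
  set T := (SB data i).2.1 with hT
  set d := (data.getD i (0, 0)).1 with hd
  set p := (data.getD i (0, 0)).2 with hp
  set sA := (valList data i).foldl (astep cA) (0, 0) with hsA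
  -- the two queries agree
  have hqe : scanTop d T = sA := by
    have h1 := scanA_spec data cA i
    have h2 := scanB_spec data i inv
    have h3 := IsMax_unique h2 h1
    simp only [Prod.mk.injEq] at h3
    refine Prod.ext ?_ ?_
    · exact h3.1
    · exact neg_injective h3.2
  -- the appended value and next_opt entry
  set lf := cA.getD i 0 with hlf
  set rt := sA.1 + p with hrt
  set v := if lf > rt then lf else rt with hv
  set o := if lf > rt then ((0 : Int), (i : Int)) else ((1 : Int), sA.2) with ho
  have hval : ((List.range i).filter
      (fun x => decide (5 < |(data.getD x (0, 0)).1 - (data.getD i (0, 0)).1|))).map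
        (fun x => x + 1) = valList data i := rfl
  have hastep : (fun (s : Int × Int) x =>
      if cA.getD x 0 > s.1 then (cA.getD x 0, (x : Int)) else s) = astep cA := rfl
  have hstepA : stepA data (cA, noA) i = if lf > rt then (cA ++ [lf], noA ++ [((0 : Int), (i : Int))])
      else (cA ++ [rt], noA ++ [((1 : Int), sA.2)]) := by
    simp only [stepA]
    rw [hval, hastep, ← hsA, ← hp, ← hlf, ← hrt]
  have hA1 : (SA data (i + 1)).1 = cA ++ [v] := by
    rw [SA_succ]
    show (stepA data (cA, noA) i).1 = cA ++ [v]
    rw [hstepA, hv]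
    split_ifs <;> rfl
  have hA2 : (SA data (i + 1)).2 = noA ++ [o] := by
    rw [SA_succ]
    show (stepA data (cA, noA) i).2 = noA ++ [o]
    rw [hstepA, ho]
    split_ifs <;> rfl
  have hclen : cA.length = i + 1 := inv.clen
  have hlast : cA.getLastD 0 = lf := by
    rw [hlf, getD_last cA i inv.clen]
  have hvlast : (cA ++ [v]).getLastD 0 = v := List.getLastD_concat
  -- B's new state
  set e0 : Int × Int := (v, -((i : Int) + 1)) with he0
  set entry : Int × Int := (match best.get? d with
    | some b => if gtB b e0 then b else e0
    | none => e0) with hentry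
  set F := T.filter (fun e => e.2.2 != d) with hF
  set I := insTop entry.1 entry.2 d F with hI
  have hc' : (if lf > rt then cA ++ [lf] else cA ++ [rt]) = cA ++ [v] := by
    rw [hv]; split_ifs <;> rfl
  have hno' : (if lf > rt then noA ++ [((0 : Int), (i : Int))] else noA ++ [((1 : Int), sA.2)]) =
      noA ++ [o] := by
    rw [ho]; split_ifs <;> rfl
  have hB : SB data (i + 1) = (best.insert d entry, I.take 12, cA ++ [v], noA ++ [o]) := by
    rw [SB_succ data i h]
    show stepB (best, T, (SB data i).2.2.1, (SB data i).2.2.2) ((i : Int), data.getD i (0, 0)) = _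
    rw [inv.ceq, inv.neq]
    show stepB (best, T, cA, noA) ((i : Int), data.getD i (0, 0)) = _
    simp only [stepB]
    rw [← hd, ← hp, hqe, hlast, ← hrt, hc', hno', hvlast, ← he0, ← hentry, ← hF, ← hI]
  -- stability of pr under the append
  have hstab : ∀ x : Nat, x ≤ i → pr (cA ++ [v]) x = pr cA x := by
    intro x hx
    unfold pr
    rw [List.getD_eq_getElem?_getD, List.getElem?_append_left (by omega : x < cA.length),
      ← List.getD_eq_getElem?_getD]
  have hprnew : pr (cA ++ [v]) (i + 1) = e0 := by
    unfold pr
    rw [getD_concat cA v i inv.clen, he0]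
    push_cast
    rfl
  have hcoordnew : coordOf data ((i + 1) - 1) = d := by simp [coordOf, hd]
  -- lle facts about entry
  have hentry_ge_e0 : lle e0 entry := by
    rw [hentry]
    cases hbd : best.get? d with
    | none => exact lle_refl _
    | some b =>
      by_cases hg : gtB b e0 = true
      · simp only [hg, if_true]
        exact gtB_true hg
      · simp only [hg, if_false]
        exact lle_refl _
  have hentry_ge_old : ∀ b, best.get? d = some b → lle b entry := by
    intro b hbd
    rw [hentry, hbd]
    by_cases hg : gtB b e0 = true
    · simp only [hg, if_true]; exact lle_refl _
    · simp only [hg, if_false]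
      exact gtB_false (Bool.not_eq_true _ ▸ hg)
  have hentry_cases : entry = e0 ∨ ∃ b, best.get? d = some b ∧ entry = b := by
    rw [hentry]
    cases hbd : best.get? d with
    | none => exact Or.inl rfl
    | some b =>
      by_cases hg : gtB b e0 = true
      · exact Or.inr ⟨b, rfl, by simp [hg]⟩
      · exact Or.inl (by simp [hg])
  -- sortedness of I
  have hFsub : F.Sublist T := List.filter_sublist
  have hFsorted : F.Pairwise (fun a b => lle (b.1, b.2.1) (a.1, a.2.1)) :=
    List.Pairwise.sublist hFsub inv.tsorted
  have hIsorted : I.Pairwise (fun a b => lle (b.1, b.2.1) (a.1, a.2.1)) := insTop_sorted hFsorted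
  have hImem : ∀ y, y ∈ I ↔ y = (entry.1, entry.2, d) ∨ y ∈ F := fun y => mem_insTop
  have hFd : ∀ e ∈ F, e.2.2 ≠ d := by
    intro e he
    rw [hF] at he
    exact bne_iff_ne.mp (List.mem_filter.mp he).2
  constructor
  case ceq => rw [hB, hA1]
  case neq => rw [hB, hA2]
  case clen =>
    rw [hA1]
    simp [hclen]
  case cmono =>
    rw [hA1]
    rw [List.isChain_append]
    refine ⟨inv.cmono, by simp, ?_⟩
    intro x hx y hy
    simp only [List.head?_cons, Option.mem_some_iff] at hy
    subst hy
    have hxl : cA.getLastD 0 = x := by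
      rw [List.getLastD_eq_getLast?, Option.mem_def.mp hx]
      rfl
    rw [hlast] at hxl
    rw [hv]
    split_ifs <;> omega
  case dnone =>
    rw [hB]
    intro k hk x h1 h2
    have hkd : k ≠ d := by
      intro rfl'
      rw [rfl', PySem.Dict.get?_insert_self] at hk
      cases hk
    rw [PySem.Dict.get?_insert_of_ne best entry hkd] at hk
    rcases Nat.lt_or_ge x (i + 1) with hxi | hxi
    · exact inv.dnone k hk x h1 (by omega)
    · have : x = i + 1 := by omega
      subst this
      rw [hcoordnew]
      exact fun hdk => hkd hdk.symm
  case dsome =>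
    rw [hB, hA1]
    intro k e hk
    by_cases hkd : k = d
    · subst hkd
      rw [PySem.Dict.get?_insert_self] at hk
      injection hk with hk
      subst hk
      constructor
      · rcases hentry_cases with he | ⟨b, hbd, he⟩
        · exact ⟨i + 1, by omega, by omega, hcoordnew, by rw [he, hprnew]⟩
        · obtain ⟨⟨x0, hx01, hx0i, hx0c, hx0e⟩, _⟩ := inv.dsome _ b hbd
          exact ⟨x0, hx01, by omega, hx0c, by rw [he, hx0e, ← hstab x0 hx0i]⟩
      · intro x h1 h2 hcoord
        rcases Nat.lt_or_ge x (i + 1) with hxi | hxi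
        · have hxi' : x ≤ i := by omega
          rw [hstab x hxi']
          cases hbd : best.get? d with
          | none => exact absurd hcoord (inv.dnone _ hbd x h1 hxi')
          | some b =>
            obtain ⟨_, hub⟩ := inv.dsome _ b hbd
            exact lle_trans (hub x h1 hxi' hcoord) (hentry_ge_old b hbd)
        · have : x = i + 1 := by omega
          subst this
          rw [hprnew]
          exact hentry_ge_e0
    · rw [PySem.Dict.get?_insert_of_ne best entry hkd] at hk
      obtain ⟨⟨x0, hx01, hx0i, hx0c, hx0e⟩, hub⟩ := inv.dsome _ e hk
      refine ⟨⟨x0, hx01, by omega, hx0c, by rw [hx0e, ← hstab x0 hx0i]⟩, ?_⟩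
      intro x h1 h2 hcoord
      rcases Nat.lt_or_ge x (i + 1) with hxi | hxi
      · have hxi' : x ≤ i := by omega
        rw [hstab x hxi']
        exact hub x h1 hxi' hcoord
      · have : x = i + 1 := by omega
        subst this
        rw [hcoordnew] at hcoord
        exact absurd hcoord.symm hkd
  case ta =>
    rw [hB]
    intro e he
    have heI : e ∈ I := List.mem_of_mem_take he
    rcases (hImem e).mp heI with rfl | heF
    · rw [PySem.Dict.get?_insert_self]
    · have hed : e.2.2 ≠ d := hFd e heF
      rw [PySem.Dict.get?_insert_of_ne best entry hed]
      exact inv.ta e (hFsub.subset heF)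
  case tnodup =>
    rw [hB]
    have hFn : (F.map (·.2.2)).Nodup :=
      List.Nodup.sublist (List.Sublist.map _ hFsub) inv.tnodup
    have hdF : d ∉ F.map (·.2.2) := by
      intro hmem
      obtain ⟨e, he, hce⟩ := List.mem_map.mp hmem
      exact hFd e he hce
    have hpermI : (I.map (·.2.2)).Perm (d :: F.map (·.2.2)) := by
      have := (insTop_perm entry.1 entry.2 d F).map (·.2.2)
      simpa using this
    have hIn : (I.map (·.2.2)).Nodup :=
      hpermI.nodup_iff.mpr (List.nodup_cons.mpr ⟨hdF, hFn⟩)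
    rw [List.map_take]
    exact List.Nodup.sublist (List.take_sublist _ _) hIn
  case tsorted =>
    rw [hB]
    exact List.Pairwise.sublist (List.take_sublist _ _) hIsorted
  case tlen =>
    rw [hB]
    simp [List.length_take]
  case tcomplete =>
    rw [hB]
    intro k e hk
    by_cases hkd : k = d
    · subst hkd
      rw [PySem.Dict.get?_insert_self] at hk
      injection hk with hk
      subst hk
      rcases take_cases hIsorted _ ((hImem _).mpr (Or.inl rfl)) with hin | ⟨hl, hb⟩
      · exact Or.inl hin
      · exact Or.inr ⟨hl, fun t ht => by simpa using hb t ht⟩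
    · rw [PySem.Dict.get?_insert_of_ne best entry hkd] at hk
      rcases inv.tcomplete _ e hk with hin | ⟨hfull, hball⟩
      · have hinF : (e.1, e.2, k) ∈ F := by
          rw [hF]
          exact List.mem_filter.mpr ⟨hin, bne_iff_ne.mpr hkd⟩
        rcases take_cases hIsorted _ ((hImem _).mpr (Or.inr hinF)) with hin' | ⟨hl, hb⟩
        · exact Or.inl hin'
        · exact Or.inr ⟨hl, fun t ht => by simpa using hb t ht⟩
      · right
        have hIlen : I.length = F.length + 1 := insTop_length _ _ _ _
        by_cases hdT : ∃ t ∈ T, t.2.2 = d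
        · obtain ⟨td, htdT, htdc⟩ := hdT
          have hgtd := inv.ta td htdT
          rw [htdc] at hgtd
          have hbe : lle (td.1, td.2.1) entry := hentry_ge_old _ hgtd
          have heb : lle e (td.1, td.2.1) := hball td htdT
          have hFlen : 11 ≤ F.length := by
            have h1 := length_filter_coord_ne T d inv.tnodup
            rw [← hF] at h1
            have hfull' : T.length = 12 := hfull
            omega
          refine ⟨?_, ?_⟩
          · simp [List.length_take]; omega
          · intro t ht
            rcases (hImem t).mp (List.mem_of_mem_take ht) with rfl | htF
            · simpa using lle_trans heb hbe
            · exact hball t (hFsub.subset htF)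
        · push_neg at hdT
          have hFT : F = T := by
            rw [hF]
            exact List.filter_eq_self.mpr (fun t ht => bne_iff_ne.mpr (hdT t ht))
          have hIlen13 : I.length = 13 := by
            have hfull' : T.length = 12 := hfull
            rw [hIlen, hFT, hfull']
          refine ⟨by simp [List.length_take]; omega, ?_⟩
          intro t ht
          rcases (hImem t).mp (List.mem_of_mem_take ht) with rfl | htF
          · -- t is the freshly inserted entry; bound e via the dropped element
            have hdropne : I.drop 12 ≠ [] := by
              intro hnil
              rw [List.drop_eq_nil_iff] at hnil
              omega
            obtain ⟨y, hy⟩ := List.exists_mem_of_ne_nil _ hdropne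
            have hyI : y ∈ I := List.mem_of_mem_drop hy
            have hyT : y ∈ T := by
              rcases (hImem y).mp hyI with rfl | hyF
              · -- impossible: the entry would occur twice in I
                exfalso
                have hcnt : I.count (entry.1, entry.2, d) = 1 := by
                  have hperm := (insTop_perm entry.1 entry.2 d F).count_eq (entry.1, entry.2, d)
                  rw [hperm, List.count_cons_self, hFT]
                  have : T.count (entry.1, entry.2, d) = 0 := by
                    apply List.count_eq_zero.mpr
                    intro hmem
                    exact hdT _ hmem rfl
                  omega
                have hsplitI : I.take 12 ++ I.drop 12 = I := List.take_append_drop 12 I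
                have : 2 ≤ I.count (entry.1, entry.2, d) := by
                  rw [← hsplitI, List.count_append]
                  have c1 : 0 < (I.take 12).count (entry.1, entry.2, d) :=
                    List.count_pos_iff.mpr ht
                  have c2 : 0 < (I.drop 12).count (entry.1, entry.2, d) :=
                    List.count_pos_iff.mpr hy
                  omega
                omega
              · rw [hFT] at hyF; exact hyF
            have h1 : lle e (y.1, y.2.1) := hball y hyT
            have h2 : lle (y.1, y.2.1) (entry.1, entry.2) := by
              have hsplitI : I.take 12 ++ I.drop 12 = I := List.take_append_drop 12 I
              have hp' : (I.take 12 ++ I.drop 12).Pairwise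
                  (fun a b => lle (b.1, b.2.1) (a.1, a.2.1)) := by rwa [hsplitI]
              have := (List.pairwise_append.mp hp').2.2 _ ht y hy
              simpa using this
            simpa using lle_trans h1 h2
          · exact hball t (hFsub.subset htF)

lemma inv_all (data : List (Int × Int)) : ∀ i, i ≤ data.length → LoopInv data i := by
  intro i
  induction i with
  | zero => intro _; exact loopInv_zero data
  | succ j ih => intro hle; exact inv_step data j (by omega) (ih (by omega))

-- the maximum of a nonempty nondecreasing list is its last element
lemma foldl_max_chain : ∀ (t : List Int) (x : Int), (x :: t).IsChain (· ≤ ·) →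
    t.foldl max x = (x :: t).getLastD 0 := by
  intro t
  induction t with
  | nil => intro x _; simp
  | cons y t' ih =>
    intro x hc
    rw [List.isChain_cons_cons] at hc
    have : max x y = y := max_eq_right hc.1
    simp only [List.foldl_cons, this, ih y hc.2, List.getLastD_cons]

lemma max_of_chain (l : List Int) (hc : l.IsChain (· ≤ ·)) (hne : l ≠ []) :
    (PySem.List.max? l (fun v => v)).getD 0 = l.getLastD 0 := by
  cases l with
  | nil => exact absurd rfl hne
  | cons x t =>
    rw [PySem.List.max?_id_cons]
    simp only [Option.getD_some]
    exact foldl_max_chain t x hc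

-- ===== VERDICT (by name: the statement is the Claim_ definition above) =====
theorem bb_itr_spec : Claim_equal_bb_itr := by
  intro data _
  unfold Spec_bb_itr
  have inv := inv_all data data.length le_rfl
  have hsb : SB data data.length =
      (PySem.List.enumerate data).foldl stepB (PySem.Dict.empty, [], [0], []) := by
    unfold SB
    rw [List.take_of_length_le (by simp [PySem.List.length_enumerate])]
  unfold bb_itr bb_itr_alt
  rw [← hsb]
  have h1 := inv.ceq
  have h2 := inv.neq
  have hmax := max_of_chain (SA data data.length).1 inv.cmono
    (by intro hnil; have := inv.clen; simp [hnil] at this)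
  show ((PySem.List.max? (SA data data.length).1 (fun v => v)).getD 0, (SA data data.length).2) = _
  rw [hmax, ← h1, ← h2]
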